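-- pv_equiv track=rewrite | github.com/raymond23101/calhacks12 | main.py | clean_text_for_speech
-- ===== SOURCE A (Python) =====
-- def clean_text_for_speech(text):
--     """Remove lexicographic symbols and formatting from text for speech"""
--     if text is None:
--         return ""
--
--     # Remove common symbols that shouldn't be spoken
--     symbols_to_remove = ['*', '#', '_', '~', '`', '^', '{', '}', '[', ']', '<', '>', '|', '\\']
--     for symbol in symbols_to_remove:
--         text = text.replace(symbol, '')
--
--     # Remove multiple spaces
--     text = ' '.join(text.split())
--
--     return text.strip()
-- ===== SOURCE B (Python) =====
-- def clean_text_for_speech(text):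
--     """Remove lexicographic symbols and formatting from text for speech"""
--     if text is None:
--         return ""
--     symbols = {'*', '#', '_', '~', '`', '^', '{', '}', '[', ']', '<', '>', '|', '\\'}
--     filtered = ''.join(c for c in text if c not in symbols)
--     return ' '.join(filtered.split())
-- ===== Notes on version B (the rewrite author's own statement) =====
-- stated objective: simpler
-- what changed: Replaces the per-symbol loop of 14 whole-string replace passes by a single per-character filtering pass using set membership, and drops the redundant final strip since the join of split words has no edge whitespace.
import Mathlib
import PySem

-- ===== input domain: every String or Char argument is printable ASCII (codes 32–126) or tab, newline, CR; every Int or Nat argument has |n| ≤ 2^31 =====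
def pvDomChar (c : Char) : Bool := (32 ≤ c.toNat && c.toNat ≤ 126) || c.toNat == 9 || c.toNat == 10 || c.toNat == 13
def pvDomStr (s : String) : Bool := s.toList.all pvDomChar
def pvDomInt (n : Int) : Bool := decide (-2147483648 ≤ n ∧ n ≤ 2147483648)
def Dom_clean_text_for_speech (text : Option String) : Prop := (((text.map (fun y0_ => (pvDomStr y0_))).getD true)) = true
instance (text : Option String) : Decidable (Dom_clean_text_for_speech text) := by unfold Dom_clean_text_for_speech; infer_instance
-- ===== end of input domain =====

-- B replaces A's loop of 14 whole-string replace passes by one per-character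
-- filtering pass (set membership) and drops the redundant final strip; simpler, same results.

-- ===== PORT A =====
def pvSymbolsA : List String :=
  ["*", "#", "_", "~", "`", "^", "{", "}", "[", "]", "<", ">", "|", "\\"]

def clean_text_for_speech (text : Option String) : String :=
  match text with
  | none => ""
  | some t0 =>
    let t1 := pvSymbolsA.foldl (fun t s => PySem.Str.replace t s "") t0
    let t2 := PySem.Str.join " " (PySem.Str.split₀ t1)
    PySem.Str.strip t2

-- ===== PORT B =====
def pvSymbolsB : PySem.Set Char :=
  PySem.Set.ofList ['*', '#', '_', '~', '`', '^', '{', '}', '[', ']', '<', '>', '|', '\\']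

def clean_text_for_speech_alt (text : Option String) : String :=
  match text with
  | none => ""
  | some t =>
    let filtered := String.ofList (t.toList.filter (fun c => !(PySem.Set.contains pvSymbolsB c)))
    PySem.Str.join " " (PySem.Str.split₀ filtered)

-- ===== PRECONDITION & SPEC =====
def Spec_clean_text_for_speech (text : Option String) (out : String) : Prop := out = clean_text_for_speech_alt text
instance (text : Option String) (out : String) : Decidable (Spec_clean_text_for_speech text out) := by unfold Spec_clean_text_for_speech; infer_instance

-- ===== CLAIM (what is proved, stated in full; the proofs are below) =====
def Claim_equal_clean_text_for_speech : Prop := ∀ (text : Option String), Dom_clean_text_for_speech text → Spec_clean_text_for_speech text (clean_text_for_speech text)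

-- ===== LEMMAS AND PROOFS =====

-- Python's s.replace(a, '') for a single character a is exactly a character filter.
theorem pv_go_filter (a : Char) : ∀ (fuel : Nat) (l acc : List Char), l.length ≤ fuel →
    PySem.Chars.replace.go [a] [] fuel l acc = acc.reverse ++ l.filter (· ≠ a) := by
  intro fuel
  induction fuel with
  | zero => intro l acc h; simp at h; simp [h, PySem.Chars.replace.go]
  | succ n ih =>
    intro l acc h
    cases l with
    | nil => simp [PySem.Chars.replace.go]
    | cons c t =>
      rw [PySem.Chars.replace.go]
      by_cases hc : c = a
      · subst hc
        simp [List.isPrefixOf, ih t _ (by simpa using h), List.filter]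
      · have hp : ([a].isPrefixOf (c :: t)) = false := by
          simp [List.isPrefixOf]; exact fun h' => hc h'.symm
        simp [hp, ih t _ (by simpa using h), List.filter, hc]

theorem pv_replace_filter (cs : List Char) (a : Char) :
    PySem.Chars.replace cs [a] [] = cs.filter (· ≠ a) := by
  have := pv_go_filter a cs.length cs [] le_rfl
  simpa [PySem.Chars.replace] using this

theorem pv_replace_step (t s : String) (a : Char) (h : s.toList = [a]) :
    (PySem.Str.replace t s "").toList = t.toList.filter (· ≠ a) := by
  rw [PySem.Str.toList_replace, h]
  exact pv_replace_filter t.toList a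

-- Chaining the 14 single-character removals is one filter by the symbol set.
theorem pv_chain (t0 : String) :
    (pvSymbolsA.foldl (fun t s => PySem.Str.replace t s "") t0).toList
      = t0.toList.filter (fun c => !(PySem.Set.contains pvSymbolsB c)) := by
  simp only [pvSymbolsA, List.foldl]
  rw [pv_replace_step _ _ '\\' rfl, pv_replace_step _ _ '|' rfl,
      pv_replace_step _ _ '>' rfl, pv_replace_step _ _ '<' rfl,
      pv_replace_step _ _ ']' rfl, pv_replace_step _ _ '[' rfl,
      pv_replace_step _ _ '}' rfl, pv_replace_step _ _ '{' rfl,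
      pv_replace_step _ _ '^' rfl, pv_replace_step _ _ '`' rfl,
      pv_replace_step _ _ '~' rfl, pv_replace_step _ _ '_' rfl,
      pv_replace_step _ _ '#' rfl, pv_replace_step _ _ '*' rfl]
  simp only [List.filter_filter]
  refine List.filter_congr ?_
  intro c _
  have hB : pvSymbolsB = ['*', '#', '_', '~', '`', '^', '{', '}', '[', ']', '<', '>', '|', '\\'] := by decide
  rw [Bool.eq_iff_iff]
  simp [hB, PySem.Set.contains, List.contains_eq_mem]
  tauto

-- Every word produced by Python's str.split() is nonempty and whitespace-free.
theorem pv_split_go_words : ∀ (cs cur : List Char) (acc : List (List Char)),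
    (∀ w ∈ acc, w ≠ [] ∧ ∀ c ∈ w, PySem.Chars.isspace c = false) →
    (∀ c ∈ cur, PySem.Chars.isspace c = false) →
    ∀ w ∈ PySem.Chars.split₀.go cs cur acc, w ≠ [] ∧ ∀ c ∈ w, PySem.Chars.isspace c = false := by
  intro cs
  induction cs with
  | nil =>
    intro cur acc hacc hcur
    rw [PySem.Chars.split₀.go]
    by_cases hc : cur.isEmpty
    · simp [hc]
      intro w hw; exact hacc w (by simpa using hw)
    · simp [hc]
      intro w hw
      rcases hw with hw | hw
      · exact hacc w hw
      · subst hw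
        constructor
        · simp; intro h; subst h; simp at hc
        · intro c hc'; exact hcur c (by simpa using hc')
  | cons c rest ih =>
    intro cur acc hacc hcur
    rw [PySem.Chars.split₀.go]
    by_cases hs : PySem.Chars.isspace c
    · by_cases hc : cur.isEmpty
      · simp [hs, hc]
        exact ih [] acc hacc (by simp)
      · simp [hs, hc]
        refine ih [] (cur.reverse :: acc) ?_ (by simp)
        intro w hw
        simp at hw
        rcases hw with hw | hw
        · subst hw
          constructor
          · simp; intro h; subst h; simp at hc
          · intro d hd; exact hcur d (by simpa using hd)
        · exact hacc w hw
    · simp [hs]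
      refine ih (c :: cur) acc hacc ?_
      intro d hd
      simp at hd
      rcases hd with hd | hd
      · subst hd; simpa using hs
      · exact hcur d hd

theorem pv_split₀_words (cs : List Char) :
    ∀ w ∈ PySem.Chars.split₀ cs, w ≠ [] ∧ ∀ c ∈ w, PySem.Chars.isspace c = false := by
  exact pv_split_go_words cs [] [] (by simp) (by simp)

-- ' '.join of nonempty whitespace-free words starts with a non-space character.
theorem pv_lstrip_inter (ws : List (List Char))
    (h : ∀ w ∈ ws, w ≠ [] ∧ ∀ c ∈ w, PySem.Chars.isspace c = false) :
    PySem.Chars.lstrip (List.intercalate [' '] ws) = List.intercalate [' '] ws := by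
  cases ws with
  | nil => simp [List.intercalate, PySem.Chars.lstrip]
  | cons w rest =>
    obtain ⟨hne, hns⟩ := h w (by simp)
    cases w with
    | nil => exact absurd rfl hne
    | cons c w' =>
      have hc : PySem.Chars.isspace c = false := hns c (by simp)
      have hx : ∃ tl, List.intercalate [' '] ((c :: w') :: rest) = c :: tl := by
        cases rest with
        | nil => exact ⟨w', by simp [List.intercalate]⟩
        | cons x r => exact ⟨w' ++ ' ' :: List.intercalate [' '] (x :: r),
            by simp [List.intercalate, List.intersperse]⟩
      obtain ⟨tl, htl⟩ := hx
      rw [htl]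
      simp [PySem.Chars.lstrip, List.dropWhile, hc]

-- …and ends with a non-space character.
theorem pv_last_inter : ∀ (ws : List (List Char)), ws ≠ [] →
    (∀ w ∈ ws, w ≠ [] ∧ ∀ c ∈ w, PySem.Chars.isspace c = false) →
    ∃ d, (List.intercalate [' '] ws).getLast? = some d ∧ PySem.Chars.isspace d = false := by
  intro ws
  induction ws with
  | nil => intro h; exact absurd rfl h
  | cons w rest ih =>
    intro _ h
    obtain ⟨hne, hns⟩ := h w (by simp)
    cases rest with
    | nil =>
      refine ⟨(w.getLast hne), ?_, hns _ (List.getLast_mem hne)⟩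
      simp [List.intercalate]
      rw [List.getLast?_eq_some_getLast hne]
    | cons x r =>
      obtain ⟨d, hd, hdns⟩ := ih (by simp) (fun w' hw' => h w' (by simp [hw']))
      refine ⟨d, ?_, hdns⟩
      have : List.intercalate [' '] (w :: x :: r)
          = (w ++ [' ']) ++ List.intercalate [' '] (x :: r) := by
        simp [List.intercalate, List.intersperse]
      rw [this, List.getLast?_append, hd]
      rfl

theorem pv_strip_inter (ws : List (List Char))
    (h : ∀ w ∈ ws, w ≠ [] ∧ ∀ c ∈ w, PySem.Chars.isspace c = false) :
    PySem.Chars.strip (List.intercalate [' '] ws) = List.intercalate [' '] ws := by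
  unfold PySem.Chars.strip
  rw [pv_lstrip_inter ws h]
  cases ws with
  | nil => simp [List.intercalate, PySem.Chars.rstrip]
  | cons w rest =>
    obtain ⟨d, hd, hdns⟩ := pv_last_inter (w :: rest) (by simp) h
    set j := List.intercalate [' '] (w :: rest) with hj
    have hrev : j.reverse.head? = some d := by rw [List.head?_reverse]; exact hd
    cases hre : j.reverse with
    | nil => simp [hre] at hrev
    | cons e tl =>
      have : e = d := by rw [hre] at hrev; simpa using hrev
      subst this
      unfold PySem.Chars.rstrip
      rw [hre]
      simp [List.dropWhile, hdns, ← hre]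

-- The two programs agree on every present string.
theorem pv_main (t : String) :
    clean_text_for_speech (some t) = clean_text_for_speech_alt (some t) := by
  show PySem.Str.strip (PySem.Str.join " " (PySem.Str.split₀
        (pvSymbolsA.foldl (fun t s => PySem.Str.replace t s "") t))) = _
  have hchain := pv_chain t
  set L := t.toList.filter (fun c => !(PySem.Set.contains pvSymbolsB c)) with hL
  have hsplit : PySem.Str.split₀ (pvSymbolsA.foldl (fun t s => PySem.Str.replace t s "") t)
      = (PySem.Chars.split₀ L).map String.ofList := by
    simp [PySem.Str.split₀, hchain]
  show PySem.Str.strip (PySem.Str.join " " (PySem.Str.split₀ _))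
      = PySem.Str.join " " (PySem.Str.split₀ (String.ofList L))
  rw [hsplit]
  have hBsplit : PySem.Str.split₀ (String.ofList L) = (PySem.Chars.split₀ L).map String.ofList := by
    simp [PySem.Str.split₀]
  rw [hBsplit]
  have hJ : PySem.Str.join " " ((PySem.Chars.split₀ L).map String.ofList)
      = String.ofList (List.intercalate [' '] (PySem.Chars.split₀ L)) := by
    simp [PySem.Str.join, PySem.Chars.join, List.map_map, Function.comp_def]
  rw [hJ]
  simp [PySem.Str.strip]
  rw [pv_strip_inter _ (pv_split₀_words L)]

-- ===== VERDICT (by name: the statement is the Claim_ definition above) =====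
theorem clean_text_for_speech_spec : Claim_equal_clean_text_for_speech := by
  intro text _
  unfold Spec_clean_text_for_speech
  cases text with
  | none => rfl
  | some t => exact pv_main t
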